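-- pv_equiv track=rewrite | github.com/SalmanSi/30_Days_Of_Leetcode | 1333-sort-the-jumbled-numbers/sort-the-jumbled-numbers.py | getMapped
-- ===== SOURCE A (Python) =====
-- def getMapped(mapping,num):
--     mapped_num=0
--     digit_count=1
--     if num==0:
--         return mapping[0]
--     while num>0:
--         num,digit=divmod(num,10)
--         mapped_num+=mapping[digit]*digit_count
--         digit_count*=10
--     return mapped_num
-- ===== SOURCE B (Python) =====
-- def getMapped(mapping, num):
--     if num < 10:
--         return mapping[num]
--     return getMapped(mapping, num // 10) * 10 + mapping[num % 10]
-- ===== Notes on version B (the rewrite author's own statement) =====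
-- stated objective: simpler
-- what changed: Replaces the iterative divmod loop with its mapped_num/digit_count accumulators (and the num==0 special case) by a three-line structural recursion that maps the least-significant digit and combines it with 10 * the recursive result on num//10.
-- outside the precondition, e.g. on getMapped([3, 4], -1): A returns 0, B returns 4; on getMapped([3, 4], -7): A returns 0, B raises IndexError
import Mathlib
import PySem

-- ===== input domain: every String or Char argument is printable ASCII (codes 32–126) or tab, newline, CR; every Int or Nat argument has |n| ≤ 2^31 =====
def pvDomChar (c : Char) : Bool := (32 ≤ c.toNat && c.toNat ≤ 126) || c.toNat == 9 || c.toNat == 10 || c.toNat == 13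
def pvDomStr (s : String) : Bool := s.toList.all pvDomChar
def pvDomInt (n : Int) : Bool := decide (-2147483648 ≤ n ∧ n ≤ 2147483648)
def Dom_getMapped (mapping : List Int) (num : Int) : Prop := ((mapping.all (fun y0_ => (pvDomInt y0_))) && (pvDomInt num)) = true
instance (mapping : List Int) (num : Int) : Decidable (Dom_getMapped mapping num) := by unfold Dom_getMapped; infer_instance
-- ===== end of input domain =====

-- B replaces A's divmod loop (with mapped_num/digit_count accumulators and a num==0 special case)
-- by a short structural recursion on num//10; objective: simpler. Return values only; no mutation.

-- ===== PORT A =====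
-- the 'while num > 0' loop of A, state (num, mapped_num, digit_count)
def getMappedLoop (mapping : List Int) (num mapped dc : Int) : Int :=
  if _h : 0 < num then
    getMappedLoop mapping (PySem.Int.floordiv num 10)
      (mapped + PySem.List.pyGetD mapping (PySem.Int.mod num 10) 0 * dc) (dc * 10)
  else mapped
termination_by num.toNat
decreasing_by
  simp only [PySem.Int.floordiv_eq_ediv_of_pos (by norm_num : (0:Int) < 10)]
  omega

def getMapped (mapping : List Int) (num : Int) : Int :=
  if num = 0 then PySem.List.pyGetD mapping 0 0
  else getMappedLoop mapping num 0 1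

-- ===== PORT B =====
def getMapped_alt (mapping : List Int) (num : Int) : Int :=
  if _h : num < 10 then PySem.List.pyGetD mapping num 0
  else getMapped_alt mapping (PySem.Int.floordiv num 10) * 10 +
       PySem.List.pyGetD mapping (PySem.Int.mod num 10) 0
termination_by num.toNat
decreasing_by
  simp only [PySem.Int.floordiv_eq_ediv_of_pos (by norm_num : (0:Int) < 10)]
  omega

-- ===== PRECONDITION & SPEC =====
-- Pre_ excludes (i) inputs where Python A raises IndexError (a decimal digit of num, or 0 itself,
-- not a valid index into mapping) and (ii) num < 0, where A's skipped loop accidentally returns the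
-- leftover accumulator 0 while B's natural recursion hits mapping[num] (wraparound or IndexError).
def Pre_getMapped (mapping : List Int) (num : Int) : Prop :=
  0 ≤ num ∧ mapping ≠ [] ∧ ∀ d ∈ Nat.digits 10 num.toNat, d < mapping.length
instance (mapping : List Int) (num : Int) : Decidable (Pre_getMapped mapping num) := by
  unfold Pre_getMapped; infer_instance

def pvWitness_getMapped : List Int × Int := ([8, 9, 4, 0, 1, 2, 6, 7, 3, 5], 338)

def Spec_getMapped (mapping : List Int) (num : Int) (out : Int) : Prop := out = getMapped_alt mapping num
instance (mapping : List Int) (num : Int) (out : Int) : Decidable (Spec_getMapped mapping num out) := by unfold Spec_getMapped; infer_instance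

-- ===== CLAIM (what is proved, stated in full; the proofs are below) =====
def Claim_equal_getMapped : Prop := ∀ (mapping : List Int) (num : Int), Dom_getMapped mapping num → Pre_getMapped mapping num → Spec_getMapped mapping num (getMapped mapping num)

-- ===== LEMMAS AND PROOFS =====

-- loop invariant: for positive num, A's loop adds dc * (B's value of num) to the accumulator
lemma getMappedLoop_eq_alt (mapping : List Int) :
    ∀ (n : Nat) (num mapped dc : Int), num.toNat = n → 0 < num →
      getMappedLoop mapping num mapped dc = mapped + getMapped_alt mapping num * dc := by
  intro n
  induction n using Nat.strong_induction_on with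
  | _ n ih =>
    intro num mapped dc hn hpos
    rw [getMappedLoop]
    simp only [hpos, dite_true]
    have h10 : (0:Int) < 10 := by norm_num
    rw [PySem.Int.floordiv_eq_ediv_of_pos h10, PySem.Int.mod_eq_emod_of_pos h10]
    by_cases hlt : num < 10
    · -- one-digit case: quotient is 0, the loop stops on the next test
      have hq : num / 10 = 0 := by omega
      have hm : num % 10 = num := by omega
      rw [hq, hm, getMappedLoop, dif_neg (lt_irrefl (0:Int)), getMapped_alt, dif_pos hlt]
    · -- multi-digit case: apply the invariant to num // 10
      have hqpos : 0 < num / 10 := by omega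
      have hqlt : (num / 10).toNat < n := by omega
      rw [ih _ hqlt (num / 10) _ _ rfl hqpos]
      conv_rhs => rw [getMapped_alt, dif_neg hlt,
        PySem.Int.floordiv_eq_ediv_of_pos h10, PySem.Int.mod_eq_emod_of_pos h10]
      ring

-- ===== VERDICT (by name: the statement is the Claim_ definition above) =====
theorem getMapped_spec : Claim_equal_getMapped := by
  intro mapping num _hdom hpre
  unfold Spec_getMapped
  rcases hpre with ⟨hnn, -, -⟩
  by_cases h0 : num = 0
  · subst h0
    rw [getMapped, getMapped_alt]
    simp
  · have hpos : 0 < num := by omega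
    rw [getMapped, if_neg h0, getMappedLoop_eq_alt mapping num.toNat num 0 1 rfl hpos]
    ring
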